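-- pv_equiv track=rewrite | github.com/adamz258/PoE-Stash-Regex-Generator | src/core/regex_generator.py | _build_suffix_regex
-- ===== SOURCE A (Python) =====
-- from typing import Iterable, List, Optional, Tuple
--
-- REGEX_META = set(".^$*+?()[]{}|\\")
--
-- def _escape_char(char: str) -> str:
--     return f"\\{char}" if char in REGEX_META else char
--
-- def _build_suffix_regex(strings: List[str]) -> str:
--     groups: dict[str, List[str]] = {}
--     for value in strings:
--         if not value:
--             raise ValueError("Empty string is not supported for suffix compaction.")
--         groups.setdefault(value[-1], []).append(value[:-1])
--
--     parts: List[str] = []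
--     for char in sorted(groups.keys()):
--         prefixes = groups[char]
--         if prefixes and all(value == "" for value in prefixes):
--             subpattern = ""
--         else:
--             subpattern = _build_suffix_regex(sorted(prefixes)) if prefixes else ""
--         if subpattern:
--             parts.append(subpattern + _escape_char(char))
--         else:
--             parts.append(_escape_char(char))
--
--     if len(parts) == 1:
--         return parts[0]
--     return "(" + "|".join(parts) + ")"
-- ===== SOURCE B (Python) =====
-- from typing import List
--
-- REGEX_META = set(".^$*+?()[]{}|\\")
--
-- def _escape_char(char: str) -> str:
--     return f"\\{char}" if char in REGEX_META else char
--
-- def _emit(revs: List[str]) -> str: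
--     # revs: lexicographically sorted reversed strings; equal first chars are contiguous
--     parts: List[str] = []
--     i = 0
--     while i < len(revs):
--         ch = revs[i][0]
--         tails: List[str] = []
--         while i < len(revs) and revs[i][0] == ch:
--             tails.append(revs[i][1:])
--             i += 1
--         sub = "" if tails[0] == "" else _emit(tails)
--         parts.append(sub + _escape_char(ch) if sub else _escape_char(ch))
--     if len(parts) == 1:
--         return parts[0]
--     return "(" + "|".join(parts) + ")"
--
-- def _build_suffix_regex(strings: List[str]) -> str:
--     # sort the reversed strings once; every recursive level is then already sorted
--     return _emit(sorted(s[::-1] for s in strings))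
-- ===== Notes on version B (the rewrite author's own statement) =====
-- stated objective: alternative
-- what changed: B reverses and sorts the strings once up front and then emits the regex by a single grouping scan per level (equal last chars are contiguous and every recursive level is already sorted), instead of A's per-level dict grouping followed by a fresh sorted() of the keys and of every prefix group at every recursion level.
import Mathlib
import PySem

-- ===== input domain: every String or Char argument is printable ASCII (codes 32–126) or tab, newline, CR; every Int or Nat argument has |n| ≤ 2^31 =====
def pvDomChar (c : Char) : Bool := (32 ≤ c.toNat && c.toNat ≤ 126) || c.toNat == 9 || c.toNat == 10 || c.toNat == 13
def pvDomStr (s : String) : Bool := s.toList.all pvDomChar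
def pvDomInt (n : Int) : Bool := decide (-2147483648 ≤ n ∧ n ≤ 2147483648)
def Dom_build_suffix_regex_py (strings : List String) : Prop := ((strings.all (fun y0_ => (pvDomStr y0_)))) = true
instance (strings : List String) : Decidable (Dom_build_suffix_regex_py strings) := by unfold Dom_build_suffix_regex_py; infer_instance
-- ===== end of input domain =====

-- Alternative algorithm: B sorts the reversed strings once and emits the regex by a grouping
-- scan per level (every recursive level is then already sorted), instead of A's per-level dict
-- grouping plus a fresh sort of the keys and of every prefix group at every recursion level.

-- ===== PORT A =====
-- shared module context: REGEX_META and _escape_char (identical in Source A and Source B)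
def pvMeta : List Char := ['.', '^', '$', '*', '+', '?', '(', ')', '[', ']', '{', '}', '|', '\\']

def pvEsc (c : Char) : List Char := if c ∈ pvMeta then ['\\', c] else [c]

def pvSumLen (xs : List (List Char)) : Nat := (xs.map List.length).sum

/-- Literal port of A's `_build_suffix_regex` over char lists, with explicit fuel
(the top-level wrapper passes fuel that is always sufficient under Pre_).
On an empty string Python raises ValueError — those inputs are outside Pre_;
the port skips them in the grouping loop. -/
def pvGoA : Nat → List (List Char) → List Char
  | 0, _ => []
  | fuel+1, strings =>
    let groups : PySem.Dict Char (List (List Char)) :=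
      strings.foldl (fun d v =>
        match v.getLast? with
        | none => d           -- `raise ValueError(...)`: outside Pre_
        | some c => d.modify c [] (· ++ [v.dropLast])) PySem.Dict.empty
    let parts : List (List Char) :=
      (PySem.List.sorted groups.keys (fun k => k) false).foldl (fun parts c =>
        let prefixes := groups.getD c []
        let subpattern : List Char :=
          if prefixes ≠ [] ∧ prefixes.all (fun v => v == ([] : List Char)) then []
          else if prefixes ≠ [] then pvGoA fuel (PySem.List.sorted prefixes (fun x => x) false)
          else []
        if subpattern ≠ [] then parts ++ [subpattern ++ pvEsc c] else parts ++ [pvEsc c]) []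
    if parts.length == 1 then parts.headD [] else '(' :: PySem.Chars.join ['|'] parts ++ [')']

def build_suffix_regex_py (strings : List String) : String :=
  String.ofList (pvGoA (pvSumLen (strings.map String.toList) + 1) (strings.map String.toList))

-- ===== PORT B =====
/-- `_emit`'s final lines: `parts[0] if len(parts) == 1 else "(" + "|".join(parts) + ")"`. -/
def pvRender (parts : List (List Char)) : List Char :=
  if parts.length == 1 then parts.headD [] else '(' :: PySem.Chars.join ['|'] parts ++ [')']

-- termination helpers for pvParts (cited by its decreasing_by)
theorem pvSumLen_sublist {l₁ l₂ : List (List Char)} (h : l₁.Sublist l₂) : pvSumLen l₁ ≤ pvSumLen l₂ :=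
  List.Sublist.sum_le_sum (List.Sublist.map _ h) (by intro a _; exact Nat.zero_le a)

theorem pvSumLen_map_tail (l : List (List Char)) : pvSumLen (l.map List.tail) ≤ pvSumLen l := by
  induction l with
  | nil => simp [pvSumLen]
  | cons x xs ih =>
    simp only [pvSumLen, List.map_cons, List.sum_cons] at *
    have : x.tail.length ≤ x.length := by simp [List.length_tail]
    omega

theorem pvParts_dec1 (r : List Char) (rest : List (List Char)) (h : r.tail ≠ []) :
    pvSumLen (((r :: rest).takeWhile (fun s => s.headD ' ' == r.headD ' ')).map List.tail)
      + (((r :: rest).takeWhile (fun s => s.headD ' ' == r.headD ' ')).map List.tail).length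
      < pvSumLen (r :: rest) + (r :: rest).length := by
  rw [List.takeWhile_cons_of_pos (by simp)]
  have h1 : pvSumLen ((List.takeWhile (fun s => s.headD ' ' == r.headD ' ') rest).map List.tail)
      ≤ pvSumLen rest :=
    le_trans (pvSumLen_map_tail _) (pvSumLen_sublist (List.takeWhile_sublist _))
  have h2 : (List.takeWhile (fun s => s.headD ' ' == r.headD ' ') rest).length ≤ rest.length :=
    List.Sublist.length_le (List.takeWhile_sublist _)
  have h3 : r.tail.length < r.length := by
    cases r with
    | nil => simp at h
    | cons a t => simp
  simp only [pvSumLen, List.map_cons, List.sum_cons, List.length_cons, List.length_map] at *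
  omega

theorem pvParts_dec2 (r : List Char) (rest : List (List Char)) :
    pvSumLen ((r :: rest).dropWhile (fun s => s.headD ' ' == r.headD ' '))
      + ((r :: rest).dropWhile (fun s => s.headD ' ' == r.headD ' ')).length
      < pvSumLen (r :: rest) + (r :: rest).length := by
  rw [List.dropWhile_cons_of_pos (by simp)]
  have h1 : pvSumLen (List.dropWhile (fun s => s.headD ' ' == r.headD ' ') rest) ≤ pvSumLen rest :=
    pvSumLen_sublist (List.dropWhile_sublist _)
  have h2 : (List.dropWhile (fun s => s.headD ' ' == r.headD ' ') rest).length ≤ rest.length :=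
    List.Sublist.length_le (List.dropWhile_sublist _)
  simp only [pvSumLen, List.map_cons, List.sum_cons, List.length_cons] at *
  omega

/-- `_emit`'s outer while loop: each step consumes one maximal run of equal first chars
(`revs` is sorted, so each run is a `takeWhile`/`dropWhile` split). -/
def pvParts : List (List Char) → List (List Char)
  | [] => []
  | r :: rest =>
    let ch := r.headD ' '
    let tails := ((r :: rest).takeWhile (fun s => s.headD ' ' == ch)).map List.tail
    let sub : List Char := if tails.headD [] == [] then [] else pvRender (pvParts tails)
    (if sub == [] then pvEsc ch else sub ++ pvEsc ch)
      :: pvParts ((r :: rest).dropWhile (fun s => s.headD ' ' == ch))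
  termination_by l => pvSumLen l + l.length
  decreasing_by
  · rename_i h
    refine pvParts_dec1 r rest ?_
    revert h
    show ¬((((r :: rest).takeWhile (fun s => s.headD ' ' == r.headD ' ')).map List.tail).headD [] == []) = true → _
    rw [List.takeWhile_cons_of_pos (by simp)]
    simp
  · exact pvParts_dec2 r rest

def build_suffix_regex_py_alt (strings : List String) : String :=
  String.ofList (pvRender (pvParts
    (PySem.List.sorted (strings.map (fun s => s.toList.reverse)) (fun x => x) false)))

-- ===== PRECONDITION & SPEC =====
-- Pre_ excludes exactly the inputs on which A raises ValueError: lists containing an empty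
-- string, or a string that is a proper suffix of another string of the list (the recursion
-- then reaches an empty prefix alongside nonempty ones and raises one level down).
def Pre_build_suffix_regex_py (strings : List String) : Prop :=
  (∀ s ∈ strings, s.toList ≠ []) ∧
  ∀ s ∈ strings, ∀ t ∈ strings, s.toList.length < t.toList.length → ¬ s.toList <:+ t.toList
instance (strings : List String) : Decidable (Pre_build_suffix_regex_py strings) := by
  unfold Pre_build_suffix_regex_py; infer_instance

def pvWitness_build_suffix_regex_py : List String := ["ab", "c.b", "xa"]

def Spec_build_suffix_regex_py (strings : List String) (out : String) : Prop := out = build_suffix_regex_py_alt strings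
instance (strings : List String) (out : String) : Decidable (Spec_build_suffix_regex_py strings out) := by unfold Spec_build_suffix_regex_py; infer_instance

-- ===== CLAIM (what is proved, stated in full; the proofs are below) =====
def Claim_equal_build_suffix_regex_py : Prop := ∀ (strings : List String), Dom_build_suffix_regex_py strings → Pre_build_suffix_regex_py strings → Spec_build_suffix_regex_py strings (build_suffix_regex_py strings)

-- ===== LEMMAS AND PROOFS =====
def pvHd (s : List Char) : Char := s.headD ' '

def pvGroupTails (rs : List (List Char)) (c : Char) : List (List Char) :=
  (rs.filter (fun s => pvHd s == c)).map List.tail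

def pvPartFor (rs : List (List Char)) (c : Char) : List Char :=
  let tails := pvGroupTails rs c
  let sub : List Char := if tails.headD [] == [] then [] else pvRender (pvParts tails)
  if sub == [] then pvEsc c else sub ++ pvEsc c

theorem pvEsc_ne_nil (c : Char) : pvEsc c ≠ [] := by
  unfold pvEsc; split <;> simp

theorem pvParts_ne_nil : ∀ (rs : List (List Char)), ∀ p ∈ pvParts rs, p ≠ [] := by
  intro rs
  induction rs using pvParts.induct with
  | case1 => simp [pvParts]
  | case2 r rest ch tails ih1 ih2 =>
    rw [pvParts]
    intro p hp
    rcases List.mem_cons.1 hp with h | h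
    · subst h
      split_ifs <;> simp [pvEsc_ne_nil]
    · exact ih2 p h

theorem pvRender_ne_nil (rs : List (List Char)) : pvRender (pvParts rs) ≠ [] := by
  unfold pvRender
  split
  · rename_i h
    cases hp : pvParts rs with
    | nil => simp [hp] at h
    | cons p ps => simpa [hp] using pvParts_ne_nil rs p (by simp [hp])
  · simp

theorem pvHd_mono {a b : List Char} (ha : a ≠ []) (hb : b ≠ []) (h : a ≤ b) :
    pvHd a ≤ pvHd b := by
  cases a with
  | nil => exact absurd rfl ha
  | cons x xs =>
    cases b with
    | nil => exact absurd rfl hb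
    | cons y ys =>
      rcases lt_or_eq_of_le h with h' | h'
      · rcases List.cons_lt_cons_iff.mp h' with h'' | ⟨h'', _⟩
        · exact le_of_lt h''
        · exact le_of_eq h''
      · rw [h']

theorem pvTail_mono {c : Char} {a b : List Char} (h : c :: a ≤ c :: b) : a ≤ b := by
  rcases lt_or_eq_of_le h with h' | h'
  · rcases List.cons_lt_cons_iff.mp h' with h'' | ⟨_, h''⟩
    · exact absurd h'' (lt_irrefl c)
    · exact le_of_lt h''
  · exact le_of_eq (by injection h')

theorem pv_take_drop_filter {α : Type} (p : α → Bool) :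
    ∀ (l : List α), l.Pairwise (fun a b => p b = true → p a = true) →
      l.takeWhile p = l.filter p ∧ l.dropWhile p = l.filter (fun s => !(p s)) := by
  intro l hl
  induction l with
  | nil => simp
  | cons a l ih =>
    rcases List.pairwise_cons.mp hl with ⟨ha, hl'⟩
    by_cases hpa : p a = true
    · simp only [List.takeWhile_cons, List.dropWhile_cons, List.filter_cons, hpa, if_pos,
        Bool.not_true, cond_true]
      obtain ⟨h1, h2⟩ := ih hl'
      simp [hpa, h1, h2]
    · have hall : ∀ b ∈ l, p b = false := by
        intro b hb
        by_contra hc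
        exact hpa (ha b hb (by revert hc; cases p b <;> simp))
      have hpa' : p a = false := by revert hpa; cases p a <;> simp
      constructor
      · rw [List.takeWhile_cons_of_neg (by simp [hpa']), List.filter_cons_of_neg (by simp [hpa'])]
        rw [List.filter_eq_nil_iff.mpr (by intro b hb; simp [hall b hb])]
      · rw [List.dropWhile_cons_of_neg (by simp [hpa']), List.filter_cons_of_pos (by simp [hpa'])]
        congr 1
        rw [List.filter_eq_self.mpr (by intro b hb; simp [hall b hb])]

theorem pv_ofList_sublist {α : Type} [BEq α] [LawfulBEq α] (l : List α) :
    (PySem.Set.ofList l).Sublist l := by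
  induction l using List.reverseRecOn with
  | nil => simp [PySem.Set.ofList_nil]
  | append_singleton l x ih =>
    rw [PySem.Set.ofList_append_singleton, PySem.Set.add_eq_ite]
    split
    · exact ih.trans (List.sublist_append_left l [x])
    · exact List.Sublist.append ih (List.Sublist.refl [x])

theorem pv_dedup_run {α : Type} [BEq α] [LawfulBEq α] (l1 l2 : List α) (c : α)
    (h1 : ∀ x ∈ l1, x = c) (hne : l1 ≠ []) (h2 : ∀ x ∈ l2, x ≠ c) :
    PySem.Set.ofList (l1 ++ l2) = c :: PySem.Set.ofList l2 := by
  induction l1 with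
  | nil => exact absurd rfl hne
  | cons a l1' ih =>
    have hac : a = c := h1 a (by simp)
    subst hac
    rw [List.cons_append, PySem.Set.ofList_cons]
    congr 1
    cases hl1' : l1' with
    | nil =>
      simp only [List.nil_append]
      exact List.filter_eq_self.mpr (by
        intro b hb
        simp [h2 b (by simpa [PySem.Set.mem_ofList] using hb)])
    | cons b l1'' =>
      rw [← hl1', ih (fun x hx => h1 x (by simp [hx])) (by simp [hl1'])]
      show List.filter (fun y => !y == a) (a :: PySem.Set.ofList l2) = PySem.Set.ofList l2
      rw [List.filter_cons_of_neg (by simp)]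
      exact List.filter_eq_self.mpr (by
        intro b hb
        simp [h2 b (by simpa [PySem.Set.mem_ofList] using hb)])

theorem pvParts_char : ∀ (rs : List (List Char)), rs.Pairwise (· ≤ ·) →
    (∀ s ∈ rs, s ≠ []) →
    pvParts rs = (PySem.List.dedup (rs.map pvHd)).map (pvPartFor rs) := by
  intro rs
  induction hn : rs.length using Nat.strong_induction_on generalizing rs with
  | _ n ihn =>
  subst hn
  match rs with
  | [] => intro _ _; simp [pvParts, PySem.List.dedup]
  | r :: rest =>
    intro hs hne
    set p : List Char → Bool := fun s => s.headD ' ' == r.headD ' ' with hp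
    -- all heads are ≥ the first head
    have hmin : ∀ s ∈ r :: rest, pvHd r ≤ pvHd s := by
      intro s hs'
      rcases List.mem_cons.1 hs' with h | h
      · subst h; exact le_refl _
      · exact pvHd_mono (hne r (by simp)) (hne s hs') ((List.pairwise_cons.mp hs).1 s h)
    have hpmono : (r :: rest).Pairwise (fun a b => p b = true → p a = true) := by
      refine hs.imp_of_mem ?_
      intro a b ha hb hab hpb
      have hb' : pvHd b = pvHd r := by simpa [hp, pvHd] using hpb
      have h1 : pvHd a ≤ pvHd r := hb' ▸ pvHd_mono (hne a ha) (hne b hb) hab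
      have h2 : pvHd r ≤ pvHd a := hmin a ha
      exact beq_iff_eq.mpr (le_antisymm h1 h2)
    obtain ⟨htake, hdrop⟩ := pv_take_drop_filter p _ hpmono
    have hsplit : r :: rest = (r :: rest).filter p ++ (r :: rest).filter (fun s => !(p s)) := by
      rw [← htake, ← hdrop, List.takeWhile_append_dropWhile]
    set G := (r :: rest).filter p with hG
    set D := (r :: rest).filter (fun s => !(p s)) with hD
    have hGhead : ∀ s ∈ G, pvHd s = pvHd r := by
      intro s hs'
      have := (List.mem_filter.mp hs').2
      simpa [hp, pvHd] using this
    have hDhead : ∀ s ∈ D, pvHd s ≠ pvHd r := by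
      intro s hs'
      have := (List.mem_filter.mp hs').2
      simpa [hp, pvHd] using this
    have hGne : G ≠ [] := by
      have : r ∈ G := List.mem_filter.mpr ⟨by simp, by simp [hp]⟩
      exact List.ne_nil_of_mem this
    -- dedup of the heads
    have hdedup : PySem.List.dedup ((r :: rest).map pvHd)
        = pvHd r :: PySem.List.dedup (D.map pvHd) := by
      rw [PySem.List.dedup_eq_ofList, PySem.List.dedup_eq_ofList]
      calc PySem.Set.ofList ((r :: rest).map pvHd)
          = PySem.Set.ofList ((G ++ D).map pvHd) := by rw [← hsplit]
        _ = PySem.Set.ofList (G.map pvHd ++ D.map pvHd) := by rw [List.map_append]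
        _ = pvHd r :: PySem.Set.ofList (D.map pvHd) := by
            refine pv_dedup_run _ _ _ ?_ ?_ ?_
            · intro x hx; obtain ⟨s, hs', rfl⟩ := List.mem_map.mp hx; exact hGhead s hs'
            · simp [hGne]
            · intro x hx; obtain ⟨s, hs', rfl⟩ := List.mem_map.mp hx; exact hDhead s hs'
    -- unfold one step of pvParts
    have hstep : pvParts (r :: rest) = pvPartFor (r :: rest) (pvHd r) :: pvParts D := by
      rw [pvParts]
      show (_ :: pvParts (List.dropWhile p (r :: rest))) = _
      rw [hdrop]
      congr 1
      show (let tails := (List.takeWhile p (r :: rest)).map List.tail;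
            let sub := if tails.headD [] == [] then [] else pvRender (pvParts tails);
            if sub == [] then pvEsc (r.headD ' ') else sub ++ pvEsc (r.headD ' ')) = _
      rw [htake]
      rfl
    -- induction on D
    have hDsub : D.Sublist (r :: rest) := List.filter_sublist
    have hDlen : D.length < (r :: rest).length := by
      have h' : D.length ≤ rest.length := by
        rw [← hdrop, List.dropWhile_cons_of_pos (by simp [hp])]
        exact List.Sublist.length_le (List.dropWhile_sublist _)
      simpa using Nat.lt_succ_of_le h'
    have hIH := ihn D.length hDlen D rfl (List.Pairwise.sublist hDsub hs)
      (fun s hs' => hne s (hDsub.subset hs'))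
    -- pvPartFor over D agrees with pvPartFor over the full list on D's heads
    have hcongr : ∀ c ∈ PySem.List.dedup (D.map pvHd), pvPartFor D c = pvPartFor (r :: rest) c := by
      intro c hc
      have hcne : c ≠ pvHd r := by
        rw [PySem.List.dedup_eq_ofList, PySem.Set.mem_ofList] at hc
        obtain ⟨s, hs', rfl⟩ := List.mem_map.mp hc
        exact hDhead s hs'
      have : pvGroupTails (r :: rest) c = pvGroupTails D c := by
        unfold pvGroupTails
        congr 1
        conv_lhs => rw [hsplit]
        rw [List.filter_append]
        rw [List.filter_eq_nil_iff.mpr (by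
          intro s hs'
          simp only [Bool.not_eq_true, beq_eq_false_iff_ne, ne_eq]
          rw [hGhead s hs']
          exact fun h => hcne h.symm)]
        rw [List.nil_append]
      unfold pvPartFor
      rw [this]
    rw [hstep, hdedup, List.map_cons, hIH, List.map_congr_left hcongr]

-- ===== A-side grouping characterization =====

theorem pvGroups_getD : ∀ (xs : List (List Char)) (d : PySem.Dict Char (List (List Char))) (c : Char),
    (xs.foldl (fun d v =>
        match v.getLast? with
        | none => d
        | some c => d.modify c [] (· ++ [v.dropLast])) d).getD c []
      = d.getD c [] ++ (xs.filter (fun v => v.getLast? == some c)).map List.dropLast := by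
  intro xs
  induction xs with
  | nil => simp
  | cons v xs ih =>
    intro d c
    rw [List.foldl_cons]
    cases hv : v.getLast? with
    | none =>
      simp only [hv]
      rw [ih, List.filter_cons_of_neg (by simp [hv])]
    | some c' =>
      simp only [hv]
      rw [ih, PySem.Dict.getD_modify]
      by_cases hcc : c = c'
      · subst hcc
        rw [if_pos rfl, List.filter_cons_of_pos (by simp [hv])]
        simp
      · rw [if_neg hcc, List.filter_cons_of_neg (by simp [hv]; exact fun h => hcc h.symm)]

theorem pvGroups_keys : ∀ (xs : List (List Char)) (d : PySem.Dict Char (List (List Char))),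
    (xs.foldl (fun d v =>
        match v.getLast? with
        | none => d
        | some c => d.modify c [] (· ++ [v.dropLast])) d).keys
      = (xs.filterMap List.getLast?).foldl PySem.Set.add d.keys := by
  intro xs
  induction xs with
  | nil => simp
  | cons v xs ih =>
    intro d
    rw [List.foldl_cons]
    cases hv : v.getLast? with
    | none => simp only [hv]; rw [ih, List.filterMap_cons_none hv]
    | some c' =>
      simp only [hv]
      rw [ih, List.filterMap_cons_some hv, List.foldl_cons]
      congr 1
      rw [PySem.Dict.keys_modify, PySem.Set.add_eq_ite]
      by_cases hc : c' ∈ d.keys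
      · rw [PySem.Dict.keys_insert_of_contains _ _ ((PySem.Dict.contains_iff_mem_keys d c').mpr hc), if_pos hc]
      · rw [PySem.Dict.keys_insert_of_not_contains _ _ (by
          by_contra h
          exact hc ((PySem.Dict.contains_iff_mem_keys d c').mp (by revert h; cases d.contains c' <;> simp))),
          if_neg hc]

theorem pv_lasts_eq (xs : List (List Char)) (hne : ∀ v ∈ xs, v ≠ []) :
    xs.filterMap List.getLast? = xs.map (fun v => pvHd v.reverse) := by
  induction xs with
  | nil => simp
  | cons v xs ih =>
    have hv : v ≠ [] := hne v (by simp)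
    have : v.getLast? = some (pvHd v.reverse) := by
      rw [← List.head?_reverse]
      cases hr : v.reverse with
      | nil => exact absurd (by simpa using hr) hv
      | cons x t => simp [pvHd, hr]
    rw [List.filterMap_cons_some this, List.map_cons,
      ih (fun w hw => hne w (by simp [hw]))]

-- the ports elaborate `sorted` with core's `List.instLT`; the PySem order lemmas state it
-- with the (propositionally equal) LinearOrder instances — this bridge converts
theorem pv_sortedL_eq (xs : List (List Char)) :
    PySem.List.sorted xs (fun x => x) false
      = @PySem.List.sorted (List Char) (List Char) (List.instLinearOrder.toLT)
          (@LinearOrder.toDecidableLT _ List.instLinearOrder) xs (fun x => x) false := by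
  congr

theorem pv_keys_eq (xs : List (List Char)) (hne : ∀ v ∈ xs, v ≠ []) :
    PySem.List.sorted (PySem.Set.ofList (xs.filterMap List.getLast?)) (fun k => k) false
      = PySem.List.dedup
          ((PySem.List.sorted (xs.map List.reverse) (fun x => x) false).map pvHd) := by
  have hperm : (PySem.List.sorted (xs.map List.reverse) (fun x => x) false).Perm
      (xs.map List.reverse) := PySem.List.sorted_perm _ _ _
  have hnex : ∀ s ∈ PySem.List.sorted (xs.map List.reverse) (fun x => x) false, s ≠ [] := by
    intro s hs
    obtain ⟨v, hv, rfl⟩ := List.mem_map.mp (hperm.subset hs)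
    simpa using hne v hv
  rw [PySem.List.dedup_eq_ofList]
  have hgoal := PySem.List.sorted_eq_of_perm_of_pairwise_lt
    (PySem.Set.ofList (xs.filterMap List.getLast?))
    (PySem.Set.ofList ((PySem.List.sorted (xs.map List.reverse) (fun x => x) false).map pvHd))
    (fun k => k) ?_ ?_
  · exact hgoal
  · rw [List.perm_ext_iff_of_nodup (PySem.Set.nodup_ofList _) (PySem.Set.nodup_ofList _)]
    intro c
    rw [PySem.Set.mem_ofList, PySem.Set.mem_ofList, pv_lasts_eq xs hne]
    have hmm : List.map (fun v => pvHd v.reverse) xs = List.map pvHd (List.map List.reverse xs) := by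
      rw [List.map_map]; rfl
    rw [hmm, (hperm.map pvHd).mem_iff]
  · -- the deduped heads are strictly increasing
    have h0 := PySem.List.sorted_pairwise (xs.map List.reverse) (fun x : List Char => x)
    rw [← pv_sortedL_eq] at h0
    have h1 : ((PySem.List.sorted (xs.map List.reverse) (fun x => x) false).map pvHd).Pairwise (· ≤ ·) := by
      rw [List.pairwise_map]
      refine List.Pairwise.imp_of_mem ?_ h0
      intro a b ha hb hab
      exact pvHd_mono (hnex a ha) (hnex b hb) hab
    have h2 := List.Pairwise.sublist (pv_ofList_sublist _) h1
    have h3 : (PySem.Set.ofList ((PySem.List.sorted (xs.map List.reverse) (fun x => x) false).map pvHd)).Nodup :=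
      PySem.Set.nodup_ofList _
    exact (h2.and h3).imp (fun h => lt_of_le_of_ne h.1 h.2)

theorem pvSumLen_perm {l₁ l₂ : List (List Char)} (h : l₁.Perm l₂) : pvSumLen l₁ = pvSumLen l₂ :=
  (h.map List.length).sum_eq

theorem pvSumLen_dropLast : ∀ (l : List (List Char)), (∀ v ∈ l, v ≠ []) →
    pvSumLen (l.map List.dropLast) + l.length = pvSumLen l := by
  intro l
  induction l with
  | nil => simp [pvSumLen]
  | cons v l ih =>
    intro h
    have hv : 0 < v.length := List.length_pos_of_ne_nil (h v (by simp))
    have hih := ih (fun w hw => h w (by simp [hw]))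
    simp only [pvSumLen, List.map_cons, List.sum_cons, List.length_cons, List.length_dropLast] at *
    omega

theorem pv_suffix_append {p q : List Char} (c : Char) (h : p <:+ q) :
    p ++ [c] <:+ q ++ [c] := by
  obtain ⟨w, rfl⟩ := h
  exact ⟨w, by rw [List.append_assoc]⟩

theorem pv_key (fuel : Nat) (xs : List (List Char)) (c : Char)
    (hne : ∀ s ∈ xs, s ≠ [])
    (hsf : ∀ s ∈ xs, ∀ t ∈ xs, s.length < t.length → ¬ s <:+ t)
    (hfuel : pvSumLen xs < fuel + 1)
    (IH : ∀ ys : List (List Char), (∀ s ∈ ys, s ≠ []) →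
      (∀ s ∈ ys, ∀ t ∈ ys, s.length < t.length → ¬ s <:+ t) → pvSumLen ys < fuel →
      pvGoA fuel ys = pvRender (pvParts (PySem.List.sorted (ys.map List.reverse) (fun x => x) false)))
    (hc : ∃ v ∈ xs, v.getLast? = some c) :
    (let P := (xs.filter (fun v => v.getLast? == some c)).map List.dropLast
     let subp : List Char :=
       if P ≠ [] ∧ P.all (fun v => v == ([] : List Char)) then []
       else if P ≠ [] then pvGoA fuel (PySem.List.sorted P (fun x => x) false) else []
     if subp ≠ [] then subp ++ pvEsc c else pvEsc c)
    = pvPartFor (PySem.List.sorted (xs.map List.reverse) (fun x => x) false) c := by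
  obtain ⟨v₀, hv₀x, hv₀l⟩ := hc
  set rsx := PySem.List.sorted (xs.map List.reverse) (fun x => x) false with hrsx
  set G := xs.filter (fun v => v.getLast? == some c) with hGdef
  set P := G.map List.dropLast with hPdef
  have hGne : G ≠ [] := List.ne_nil_of_mem (List.mem_filter.mpr ⟨hv₀x, by simp [hv₀l]⟩)
  have hPne : P ≠ [] := by
    rw [hPdef]; cases hG : G with
    | nil => exact absurd hG hGne
    | cons a t => simp
  have hGmem : ∀ v ∈ G, v ∈ xs ∧ v.getLast? = some c := by
    intro v hv
    exact ⟨(List.mem_filter.mp hv).1, by simpa using (List.mem_filter.mp hv).2⟩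
  have hGrep : ∀ v ∈ G, v = v.dropLast ++ [c] := by
    intro v hv
    obtain ⟨l', hl'⟩ := List.getLast?_eq_some_iff.mp (hGmem v hv).2
    rw [hl']; simp
  have hPmem : ∀ p ∈ P, ∃ v ∈ xs, v.getLast? = some c ∧ v = p ++ [c] := by
    intro p hp
    obtain ⟨v, hv, rfl⟩ := List.mem_map.mp hp
    exact ⟨v, (hGmem v hv).1, (hGmem v hv).2, hGrep v hv⟩
  have hpermx : rsx.Perm (xs.map List.reverse) := PySem.List.sorted_perm _ _ _
  have hsx : rsx.Pairwise (· ≤ ·) := by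
    have h0 := PySem.List.sorted_pairwise (xs.map List.reverse) (fun x : List Char => x)
    rw [← pv_sortedL_eq] at h0
    exact h0
  have hnex : ∀ s ∈ rsx, s ≠ [] := by
    intro s hs
    obtain ⟨v, hv, rfl⟩ := List.mem_map.mp (hpermx.subset hs)
    simpa using hne v hv
  set T := pvGroupTails rsx c with hTdef
  have hfilt : (xs.map List.reverse).filter (fun s => pvHd s == c) = G.map List.reverse := by
    rw [List.filter_map, hGdef]
    congr 1
    apply List.filter_congr
    intro v hv
    show (pvHd v.reverse == c) = (v.getLast? == some c)
    have hv' : v.getLast? = v.reverse.head? := List.head?_reverse.symm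
    cases hr : v.reverse with
    | nil => exact absurd (by simpa using hr) (hne v hv)
    | cons x t =>
      rw [hv', hr]
      simp [pvHd]
  have hTperm : T.Perm (P.map List.reverse) := by
    rw [hTdef]
    unfold pvGroupTails
    have h1 := (hpermx.filter (fun s => pvHd s == c)).map List.tail
    rw [hfilt] at h1
    refine h1.trans ?_
    rw [List.map_map]
    have hmr : List.map (List.tail ∘ List.reverse) G = List.map List.reverse P := by
      rw [hPdef, List.map_map]
      apply List.map_congr_left
      intro v _
      exact List.tail_reverse
    rw [hmr]
  have hGfmem : ∀ s ∈ rsx.filter (fun s => pvHd s == c), s = c :: s.tail := by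
    intro s hs
    have h2 := List.mem_filter.mp hs
    have hsne := hnex s h2.1
    have hhd : pvHd s = c := by simpa using h2.2
    cases s with
    | nil => exact absurd rfl hsne
    | cons a t => simp [pvHd] at hhd; rw [hhd]; rfl
  have hTsorted : T.Pairwise (· ≤ ·) := by
    rw [hTdef]
    unfold pvGroupTails
    rw [List.pairwise_map]
    refine List.Pairwise.imp_of_mem ?_ (List.Pairwise.sublist (List.filter_sublist) hsx)
    intro a b ha hb hab
    rw [hGfmem a ha, hGfmem b hb] at hab
    exact pvTail_mono hab
  show (let subp : List Char :=
       if P ≠ [] ∧ P.all (fun v => v == ([] : List Char)) then []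
       else if P ≠ [] then pvGoA fuel (PySem.List.sorted P (fun x => x) false) else []
     if subp ≠ [] then subp ++ pvEsc c else pvEsc c) = pvPartFor rsx c
  by_cases hall : P.all (fun v => v == ([] : List Char)) = true
  · -- every prefix is empty: the subpattern is empty on both sides
    have hTnil : ∀ t ∈ T, t = [] := by
      intro t ht
      obtain ⟨p, hp, rfl⟩ := List.mem_map.mp (hTperm.subset ht)
      have : p = [] := by simpa using List.all_eq_true.mp hall p hp
      simp [this]
    have hThead : (T.headD [] == []) = true := by
      cases hT : T with
      | nil => simp
      | cons t ts => simpa using hTnil t (by simp [hT])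
    have hcond : P ≠ [] ∧ (P.all (fun v => v == ([] : List Char))) = true := ⟨hPne, hall⟩
    rw [if_pos hcond]
    unfold pvPartFor
    rw [← hTdef]
    simp only [hThead, if_pos]
    simp
  · -- some prefix is nonempty: under Pre_ none is, and both sides recurse
    have hex : ∃ q ∈ P, q ≠ [] := by
      by_contra hq
      refine hall (List.all_eq_true.mpr ?_)
      intro q hqp
      have hq' : q = [] := by
        by_contra hne'
        exact hq ⟨q, hqp, hne'⟩
      simp [hq']
    have hPnonnil : ∀ p ∈ P, p ≠ [] := by
      intro p hp hpnil
      obtain ⟨q, hq, hqne⟩ := hex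
      obtain ⟨v₁, hv₁x, _, hv₁e⟩ := hPmem p hp
      obtain ⟨v₂, hv₂x, _, hv₂e⟩ := hPmem q hq
      have hlen : v₁.length < v₂.length := by
        rw [hv₁e, hv₂e, hpnil]
        simp [List.length_pos_of_ne_nil hqne]
      have hsuf : v₁ <:+ v₂ := by
        rw [hv₁e, hv₂e, hpnil]
        exact pv_suffix_append c List.nil_suffix
      exact hsf v₁ hv₁x v₂ hv₂x hlen hsuf
    have hTne : T ≠ [] := by
      intro hT
      have hlen := hTperm.length_eq
      rw [hT] at hlen
      simp only [List.length_nil, List.length_map] at hlen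
      exact hPne (List.length_eq_zero_iff.mp hlen.symm)
    have hTnonnil : ∀ t ∈ T, t ≠ [] := by
      intro t ht htnil
      obtain ⟨p, hp, hpe⟩ := List.mem_map.mp (hTperm.subset ht)
      apply hPnonnil p hp
      rw [htnil] at hpe
      exact List.reverse_eq_nil_iff.mp hpe
    have hThead : (T.headD [] == ([] : List Char)) = false := by
      cases hT : T with
      | nil => exact absurd hT hTne
      | cons t ts =>
        have := hTnonnil t (by simp [hT])
        simpa using this
    -- the recursive call
    set SP := PySem.List.sorted P (fun x => x) false with hSP
    have hSPperm : SP.Perm P := PySem.List.sorted_perm _ _ _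
    have hneSP : ∀ s ∈ SP, s ≠ [] := fun s hs => hPnonnil s (hSPperm.subset hs)
    have hsfSP : ∀ s ∈ SP, ∀ t ∈ SP, s.length < t.length → ¬ s <:+ t := by
      intro s hs t ht hlen hsuf
      obtain ⟨v₁, hv₁x, _, hv₁e⟩ := hPmem s (hSPperm.subset hs)
      obtain ⟨v₂, hv₂x, _, hv₂e⟩ := hPmem t (hSPperm.subset ht)
      refine hsf v₁ hv₁x v₂ hv₂x ?_ ?_
      · rw [hv₁e, hv₂e]; simpa using hlen
      · rw [hv₁e, hv₂e]; exact pv_suffix_append c hsuf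
    have hfuelP : pvSumLen SP < fuel := by
      have h1 : pvSumLen SP = pvSumLen P := pvSumLen_perm hSPperm
      have h2 : pvSumLen P + G.length = pvSumLen G :=
        pvSumLen_dropLast G (fun v hv => hne v (hGmem v hv).1)
      have h3 : pvSumLen G ≤ pvSumLen xs := pvSumLen_sublist (List.filter_sublist)
      have h4 : 0 < G.length := List.length_pos_of_ne_nil hGne
      omega
    have hrec := IH SP hneSP hsfSP hfuelP
    have hs1 : PySem.List.sorted (SP.map List.reverse) (fun x => x) false
        = PySem.List.sorted (P.map List.reverse) (fun x => x) false := by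
      rw [pv_sortedL_eq (SP.map List.reverse), pv_sortedL_eq (P.map List.reverse)]
      exact PySem.List.sorted_eq_sorted_of_perm _ _ _ (fun a b h => h) (hSPperm.map _)
    have hs2 : PySem.List.sorted (P.map List.reverse) (fun x => x) false = T := by
      rw [pv_sortedL_eq]
      exact PySem.List.sorted_id_eq_of_perm_of_pairwise _ _ hTperm hTsorted
    have hsub : pvGoA fuel SP = pvRender (pvParts T) := by
      rw [hrec, hs1, hs2]
    have hsubne : pvGoA fuel SP ≠ [] := by
      rw [hsub]; exact pvRender_ne_nil T
    have hnotcond : ¬ (P ≠ [] ∧ (P.all (fun v => v == ([] : List Char))) = true) :=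
      fun h => hall h.2
    rw [if_neg hnotcond, if_pos hPne, if_pos hsubne]
    have hrne : (pvRender (pvParts T) == ([] : List Char)) = false := by
      cases h : pvRender (pvParts T) with
      | nil => exact absurd h (pvRender_ne_nil T)
      | cons a t => simp
    unfold pvPartFor
    rw [← hTdef]
    simp only [hThead, Bool.false_eq_true, if_neg, hrne, if_false]
    rw [hsub]

theorem pv_foldl_if_append {α β : Type} (q : α → Prop) [DecidablePred q] (f g : α → List β) :
    ∀ (l : List α) (init : List (List β)),
      l.foldl (fun acc c => if q c then acc ++ [f c] else acc ++ [g c]) init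
        = init ++ l.map (fun c => if q c then f c else g c) := by
  intro l
  induction l with
  | nil => simp
  | cons a l ih =>
    intro init
    rw [List.foldl_cons, List.map_cons, ih]
    by_cases hq : q a
    · rw [if_pos hq, if_pos hq, List.append_cons, List.append_assoc]
      simp
    · rw [if_neg hq, if_neg hq, List.append_cons, List.append_assoc]
      simp

theorem pv_parts_foldl (K : List Char) (d : PySem.Dict Char (List (List Char))) (fuel : Nat)
    (init : List (List Char)) :
    K.foldl (fun parts c =>
      if (if d.getD c [] ≠ [] ∧ (d.getD c []).all (fun v => v == ([] : List Char)) then []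
          else if d.getD c [] ≠ [] then pvGoA fuel (PySem.List.sorted (d.getD c []) (fun x => x) false) else []) ≠ []
      then parts ++ [(if d.getD c [] ≠ [] ∧ (d.getD c []).all (fun v => v == ([] : List Char)) then []
          else if d.getD c [] ≠ [] then pvGoA fuel (PySem.List.sorted (d.getD c []) (fun x => x) false) else []) ++ pvEsc c]
      else parts ++ [pvEsc c]) init
    = init ++ K.map (fun c =>
        if (if d.getD c [] ≠ [] ∧ (d.getD c []).all (fun v => v == ([] : List Char)) then []
            else if d.getD c [] ≠ [] then pvGoA fuel (PySem.List.sorted (d.getD c []) (fun x => x) false) else []) ≠ []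
        then (if d.getD c [] ≠ [] ∧ (d.getD c []).all (fun v => v == ([] : List Char)) then []
            else if d.getD c [] ≠ [] then pvGoA fuel (PySem.List.sorted (d.getD c []) (fun x => x) false) else []) ++ pvEsc c
        else pvEsc c) :=
  pv_foldl_if_append _ _ _ K init

theorem pv_main : ∀ (fuel : Nat) (xs : List (List Char)),
    (∀ s ∈ xs, s ≠ []) →
    (∀ s ∈ xs, ∀ t ∈ xs, s.length < t.length → ¬ s <:+ t) →
    pvSumLen xs < fuel →
    pvGoA fuel xs = pvRender (pvParts
      (PySem.List.sorted (xs.map List.reverse) (fun x => x) false)) := by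
  intro fuel
  induction fuel with
  | zero => intro xs _ _ h; exact absurd h (Nat.not_lt_zero _)
  | succ fuel ih =>
    intro xs hne hsf hfuel
    have hpermx : (PySem.List.sorted (xs.map List.reverse) (fun x => x) false).Perm
        (xs.map List.reverse) := PySem.List.sorted_perm _ _ _
    have hsx : (PySem.List.sorted (xs.map List.reverse) (fun x => x) false).Pairwise (· ≤ ·) := by
      have h0 := PySem.List.sorted_pairwise (xs.map List.reverse) (fun x : List Char => x)
      rw [← pv_sortedL_eq] at h0
      exact h0
    have hnex : ∀ s ∈ PySem.List.sorted (xs.map List.reverse) (fun x => x) false, s ≠ [] := by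
      intro s hs
      obtain ⟨v, hv, rfl⟩ := List.mem_map.mp (hpermx.subset hs)
      simpa using hne v hv
    rw [pvParts_char _ hsx hnex]
    simp only [pvGoA]
    set d := xs.foldl (fun (d : PySem.Dict Char (List (List Char))) v =>
        match v.getLast? with
        | none => d
        | some c => d.modify c [] (· ++ [v.dropLast])) PySem.Dict.empty with hd
    have hkeys : d.keys = PySem.Set.ofList (xs.filterMap List.getLast?) := by
      rw [hd, pvGroups_keys xs]
      rfl
    rw [hkeys, pv_parts_foldl, List.nil_append]
    show pvRender _ = pvRender _
    congr 1
    rw [pv_keys_eq xs hne]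
    apply List.map_congr_left
    intro c hc
    have hcex : ∃ v ∈ xs, v.getLast? = some c := by
      rw [PySem.List.dedup_eq_ofList, PySem.Set.mem_ofList] at hc
      obtain ⟨s, hs, rfl⟩ := List.mem_map.mp hc
      obtain ⟨v, hv, rfl⟩ := List.mem_map.mp (hpermx.subset hs)
      refine ⟨v, hv, ?_⟩
      rw [← List.head?_reverse]
      cases hr : v.reverse with
      | nil => exact absurd (by simpa using hr) (hne v hv)
      | cons x t => simp [pvHd, hr]
    have hgd : d.getD c [] = (xs.filter (fun v => v.getLast? == some c)).map List.dropLast := by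
      rw [hd, pvGroups_getD]
      simp
    rw [hgd]
    exact pv_key fuel xs c hne hsf hfuel ih hcex

-- ===== VERDICT (by name: the statement is the Claim_ definition above) =====
theorem build_suffix_regex_py_spec : Claim_equal_build_suffix_regex_py := by
  intro strings _hdom hpre
  unfold Spec_build_suffix_regex_py build_suffix_regex_py build_suffix_regex_py_alt
  obtain ⟨h1, h2⟩ := hpre
  have := pv_main (pvSumLen (strings.map String.toList) + 1) (strings.map String.toList)
    (by simpa using h1)
    (by intro s hs t ht; simp only [List.mem_map] at hs ht
        obtain ⟨s', hs', rfl⟩ := hs; obtain ⟨t', ht', rfl⟩ := ht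
        exact h2 s' hs' t' ht')
    (Nat.lt_succ_self _)
  rw [this]
  congr 1
  simp [List.map_map]
  rfl
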